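-- pv_equiv track=rewrite | github.com/gitzx/Algorithm_exercise | LeetCode_Python/HashTable/Intersetion_of_Two_Arrays.py | intersetion
-- ===== SOURCE A (Python) =====
-- def intersetion(nums1, nums2):
-- 	set1 = set(nums1)
-- 	ans = []
-- 	for x in nums2:
-- 		if x in set1:
-- 			ans += x,
-- 			set1.remove(x)
-- 	return ans
-- ===== SOURCE B (Python) =====
-- def intersetion(nums1, nums2):
-- 	first = {}
-- 	for i, x in enumerate(nums2):
-- 		if x not in first:
-- 			first[x] = i
-- 	common = set(nums1) & set(nums2)
-- 	return sorted(common, key=first.__getitem__)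
-- ===== Notes on version B (the rewrite author's own statement) =====
-- stated objective: alternative
-- what changed: Instead of one filtering pass over nums2 with a shrinking lookup set, B computes the intersection as a pure set operation set(nums1) & set(nums2) and reconstructs A's output order by sorting that set by each element's first-occurrence index in nums2 (recorded in one indexing pass).
import Mathlib
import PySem

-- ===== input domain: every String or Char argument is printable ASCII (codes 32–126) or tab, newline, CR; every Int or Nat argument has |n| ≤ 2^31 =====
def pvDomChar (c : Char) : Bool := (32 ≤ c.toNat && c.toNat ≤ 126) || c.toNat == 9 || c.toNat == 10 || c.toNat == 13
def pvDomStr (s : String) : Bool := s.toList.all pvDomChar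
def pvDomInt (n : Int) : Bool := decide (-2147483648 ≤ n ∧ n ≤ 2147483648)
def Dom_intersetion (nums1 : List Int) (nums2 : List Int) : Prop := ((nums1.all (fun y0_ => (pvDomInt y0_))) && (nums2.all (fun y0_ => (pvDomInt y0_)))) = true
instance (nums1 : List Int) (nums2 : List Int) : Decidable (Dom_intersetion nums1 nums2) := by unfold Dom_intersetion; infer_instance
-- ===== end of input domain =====

-- B replaces A's single filtering pass with a shrinking lookup set by a pure set intersection
-- set(nums1) & set(nums2) re-ordered by sorting on each element's first-occurrence index in nums2 (alternative algorithm).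


-- ===== PORT A =====
-- set1.remove(x) is executed only under the guard 'x in set1', so it never raises and equals Set.discard.
def intersetion (nums1 : List Int) (nums2 : List Int) : List Int :=
  let set1 : PySem.Set Int := PySem.Set.ofList nums1
  (nums2.foldl
    (fun (st : PySem.Set Int × List Int) x =>
      if PySem.Set.contains st.1 x then (PySem.Set.discard st.1 x, st.2 ++ [x]) else st)
    (set1, [])).2

-- ===== PORT B =====
-- first.__getitem__ is applied by sorted only to elements of common ⊆ nums2, all of which are keys
-- of first, so it never raises; Dict.getD with a dummy default 0 is exact there.
-- sorted over the set 'common' is order-independent: the key (first-occurrence index) is injective on it.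
def intersetion_alt (nums1 : List Int) (nums2 : List Int) : List Int :=
  let first : PySem.Dict Int Int :=
    (PySem.List.enumerate nums2 0).foldl
      (fun d p => if ¬ d.contains p.2 then d.insert p.2 p.1 else d) PySem.Dict.empty
  let common : PySem.Set Int := PySem.Set.inter (PySem.Set.ofList nums1) (PySem.Set.ofList nums2)
  PySem.List.sorted common (fun x => first.getD x 0)

-- ===== PRECONDITION & SPEC =====
def Spec_intersetion (nums1 : List Int) (nums2 : List Int) (out : List Int) : Prop := out = intersetion_alt nums1 nums2
instance (nums1 : List Int) (nums2 : List Int) (out : List Int) : Decidable (Spec_intersetion nums1 nums2 out) := by unfold Spec_intersetion; infer_instance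

-- ===== CLAIM (what is proved, stated in full; the proofs are below) =====
def Claim_equal_intersetion : Prop := ∀ (nums1 : List Int) (nums2 : List Int), Dom_intersetion nums1 nums2 → Spec_intersetion nums1 nums2 (intersetion nums1 nums2)

-- ===== LEMMAS AND PROOFS =====

-- A's mutating loop, over any list and any starting set/accumulator, produces the accumulator
-- followed by the first-occurrence dedup of the list filtered by membership in the starting set.
theorem intersetion_loop_eq (l : List Int) (s : PySem.Set Int) (acc : List Int) :
    (l.foldl
      (fun (st : PySem.Set Int × List Int) x =>
        if PySem.Set.contains st.1 x then (PySem.Set.discard st.1 x, st.2 ++ [x]) else st)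
      (s, acc)).2
    = acc ++ (PySem.List.dedup l).filter (fun x => PySem.Set.contains s x) := by
  induction l generalizing s acc with
  | nil => simp [PySem.List.dedup]
  | cons x l ih =>
    simp only [List.foldl_cons, PySem.List.dedup_eq_ofList, PySem.Set.ofList_cons, List.filter_cons]
    by_cases hx : x ∈ s
    · rw [if_pos (by simpa [PySem.Set.contains_iff] using hx)]
      simp only [(PySem.Set.contains_iff s x).mpr hx, if_pos]
      rw [ih, PySem.List.dedup_eq_ofList]
      simp only [PySem.Set.discard, List.filter_filter]
      simp [List.append_assoc, beq_eq_decide]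
    · rw [if_neg (by simpa [PySem.Set.contains_iff] using hx)]
      have hcx : PySem.Set.contains s x = false := by
        simpa using (fun h => hx ((PySem.Set.contains_iff s x).1 h))
      simp only [hcx, Bool.false_eq_true, if_false]
      rw [ih, PySem.List.dedup_eq_ofList]
      congr 1
      simp only [PySem.Set.discard, List.filter_filter]
      apply List.filter_congr
      intro y _
      by_cases hyx : y = x
      · subst hyx; simp [hx]
      · simp [hyx]

-- B's indexing loop builds the dict of FIRST-occurrence indices.
theorem first_get?_eq (xs : List Int) (s : Int) (d : PySem.Dict Int Int) (x : Int) :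
    ((PySem.List.enumerate xs s).foldl
      (fun d (p : Int × Int) => if ¬ d.contains p.2 then d.insert p.2 p.1 else d) d).get? x =
    if d.contains x then d.get? x
    else if x ∈ xs then some (s + (xs.idxOf x : Int)) else none := by
  induction xs generalizing s d with
  | nil =>
    simp only [PySem.List.enumerate, List.foldl_nil, List.not_mem_nil, if_false]
    by_cases h : d.contains x
    · simp [h]
    · have hb : d.contains x = false := by simpa using h
      have hs := d.contains_eq_isSome_get? x
      rw [hb] at hs
      simp only [hb, Bool.false_eq_true, if_false]
      exact Option.not_isSome_iff_eq_none.mp (by rw [← hs]; simp)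
  | cons y xs ih =>
    have henum : PySem.List.enumerate (y :: xs) s = (s, y) :: PySem.List.enumerate xs (s + 1) := by
      simp [PySem.List.enumerate]
    rw [henum, List.foldl_cons]
    by_cases hdy : d.contains y
    · simp only [hdy, not_true, if_false, ih]
      by_cases hdx : d.contains x
      · simp [hdx]
      · simp only [hdx, Bool.false_eq_true, if_false]
        by_cases hxy : x = y
        · subst hxy
          exact absurd hdy (by simp [hdx])
        · rw [List.idxOf_cons_ne xs (fun h => hxy h.symm)]
          simp only [List.mem_cons, hxy, false_or]
          by_cases hx : x ∈ xs
          · simp only [hx, if_pos]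
            congr 1
            push_cast
            ring
          · simp [hx]
    · rw [if_pos hdy, ih]
      by_cases hxy : x = y
      · subst hxy
        have hdx : d.contains x = false := by simpa using hdy
        have hcix : (d.insert x s).contains x = true := by
          rw [PySem.Dict.contains_insert]; simp
        simp [hcix, PySem.Dict.get?_insert_self, List.idxOf_cons_self, hdx]
      · have hci : (d.insert y s).contains x = d.contains x := by
          rw [PySem.Dict.contains_insert]; simp [hxy]
        rw [hci]
        by_cases hdx : d.contains x
        · simp [hdx, PySem.Dict.get?_insert_of_ne d s hxy]
        · simp only [hdx, Bool.false_eq_true, if_false]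
          rw [List.idxOf_cons_ne xs (fun h => hxy h.symm)]
          simp only [List.mem_cons, hxy, false_or]
          by_cases hx : x ∈ xs
          · simp only [hx, if_pos]
            congr 1
            push_cast
            ring
          · simp [hx]

-- Set.ofList's left fold from any starting set.
theorem foldl_add_eq (l : List Int) (s : PySem.Set Int) :
    l.foldl PySem.Set.add s = s ++ (PySem.List.dedup l).filter (fun y => !(PySem.Set.contains s y)) := by
  induction l generalizing s with
  | nil => simp [PySem.List.dedup]
  | cons y l ih =>
    have hd : PySem.List.dedup (y :: l) = y :: (PySem.List.dedup l).filter (fun z => !(z == y)) := by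
      show PySem.Set.ofList (y :: l) = _
      rw [PySem.Set.ofList_eq_foldl]
      simp only [List.foldl_cons]
      rw [ih]
      simp [PySem.Set.add, PySem.Set.contains, beq_eq_decide]
    rw [List.foldl_cons, ih, hd]
    by_cases hy : y ∈ s
    · have hc : PySem.Set.contains s y = true := (PySem.Set.contains_iff s y).mpr hy
      simp only [PySem.Set.add, hc, if_pos, List.filter_cons, Bool.not_true]
      simp only [Bool.false_eq_true, if_false]
      congr 1
      rw [List.filter_filter]
      apply List.filter_congr
      intro z _
      by_cases hz : z = y
      · subst hz; simp
        exact hy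
      · simp [hz]
    · have hc : PySem.Set.contains s y = false := by
        simpa using fun h => hy ((PySem.Set.contains_iff s y).1 h)
      simp only [PySem.Set.add, hc, Bool.false_eq_true, if_false, List.filter_cons, Bool.not_false,
        if_pos, List.append_assoc, List.singleton_append]
      congr 2
      rw [List.filter_filter]
      apply List.filter_congr
      intro z _
      by_cases hz : z = y
      · subst hz; simp
      · have hcz : PySem.Set.contains (s ++ [y]) z = PySem.Set.contains s z := by
          simp [PySem.Set.contains, hz]
        rw [hcz]
        simp [hz]

theorem dedup_cons (x : Int) (l : List Int) :
    PySem.List.dedup (x :: l) = x :: (PySem.List.dedup l).filter (fun z => !(z == x)) := by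
  show PySem.Set.ofList (x :: l) = _
  rw [PySem.Set.ofList_eq_foldl]
  simp only [List.foldl_cons]
  rw [foldl_add_eq]
  simp [PySem.Set.add, PySem.Set.contains, beq_eq_decide]

-- dedup lists its elements in strictly increasing order of first occurrence.
theorem dedup_pairwise_idxOf (l : List Int) :
    (PySem.List.dedup l).Pairwise (fun a b => l.idxOf a < l.idxOf b) := by
  induction l with
  | nil => simp [PySem.List.dedup]
  | cons y l ih =>
    rw [dedup_cons]
    constructor
    · intro b hb
      have hbne : b ≠ y := by simpa using List.of_mem_filter hb
      rw [List.idxOf_cons_self, List.idxOf_cons_ne l (fun h => hbne h.symm)]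
      exact Nat.succ_pos _
    · refine (ih.filter _).imp_of_mem ?_
      intro a b ha hb hab
      have hane : a ≠ y := by simpa using List.of_mem_filter ha
      have hbne : b ≠ y := by simpa using List.of_mem_filter hb
      rw [List.idxOf_cons_ne l (fun h => hane h.symm), List.idxOf_cons_ne l (fun h => hbne h.symm)]
      exact Nat.succ_lt_succ hab

-- ===== VERDICT (by name: the statement is the Claim_ definition above) =====
theorem intersetion_spec : Claim_equal_intersetion := by
  intro nums1 nums2 _
  unfold Spec_intersetion intersetion intersetion_alt
  rw [intersetion_loop_eq]
  simp only [List.nil_append]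
  refine (PySem.List.sorted_eq_of_perm_of_pairwise_lt _ _ _ ?_ ?_).symm
  · refine (List.perm_ext_iff_of_nodup ((PySem.List.nodup_dedup nums2).filter _)
      ((PySem.Set.nodup_ofList nums1).filter _)).mpr ?_
    intro a
    simp only [List.mem_filter, PySem.List.mem_dedup, PySem.Set.mem_ofList,
      PySem.Set.contains_iff]
    tauto
  · refine ((dedup_pairwise_idxOf nums2).filter _).imp_of_mem ?_
    intro a b ha hb hab
    have ha2 : a ∈ nums2 := (PySem.List.mem_dedup _ _).1 (List.mem_of_mem_filter ha)
    have hb2 : b ∈ nums2 := (PySem.List.mem_dedup _ _).1 (List.mem_of_mem_filter hb)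
    have hkey : ∀ c ∈ nums2, PySem.Dict.getD
        ((PySem.List.enumerate nums2 0).foldl
          (fun d (p : Int × Int) => if ¬ d.contains p.2 then d.insert p.2 p.1 else d)
          PySem.Dict.empty) c 0 = (nums2.idxOf c : Int) := by
      intro c hc
      unfold PySem.Dict.getD
      rw [first_get?_eq]
      simp [PySem.Dict.contains, PySem.Dict.empty, hc]
    rw [hkey a ha2, hkey b hb2]
    exact_mod_cast hab
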